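-- pv_equiv track=rewrite | github.com/sociocom/MedNER-J | medner_j/util.py | convert_iob_to_xml
-- ===== SOURCE A (Python) =====
-- def convert_iob_to_xml(tokens, iobs):
--     results = []
--     for tt, ii in zip(tokens, iobs):
--         assert len(tt) == len(ii), ''
--
--         result = ''
--
--         ii = ['O'] + ii + ['O']
--         for idx in range(1, len(ii)-1):
--             prefix, tag = split_tag(ii[idx])
--             if is_chunk_start(ii[idx-1], ii[idx]):
--                 result += '<{}>'.format(tag)
--
--             result += tt[idx-1]
--
--             if is_chunk_end(ii[idx], ii[idx+1]):
--                 result += '</{}>'.format(tag)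
--
--         results.append(result)
--
--     return results
--
-- def split_tag(chunk_tag):
--     if chunk_tag == 'O':
--         return ('O', None)
--     else:
--         return chunk_tag.split('-', maxsplit=1)
--
-- def is_chunk_end(tag, post_tag):
--     """
--     (current_tag, post_tag)
--     (B-C, I-C) -> False
--     (B-C, O) -> True
--     """
--
--     prefix1, chunk_type1 = split_tag(tag)
--     prefix2, chunk_type2 = split_tag(post_tag)
--
--     if prefix1 == 'O':
--         return False
--     if prefix2 == 'O':
--         return prefix1 != 'O'
--
--     return chunk_type1 != chunk_type2
--
-- def is_chunk_start(prev_tag, tag):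
--     """
--     (prev_tag, current_tag)
--     (B-C, I-C) -> False
--     (O, B-C) -> True
--     """
--
--     prefix1, chunk_type1 = split_tag(prev_tag)
--     prefix2, chunk_type2 = split_tag(tag)
--
--     if prefix2 == 'O':
--         return False
--     if prefix1 == 'O':
--         return prefix2 != 'O'
--
--     return chunk_type1 != chunk_type2
-- ===== SOURCE B (Python) =====
-- def split_tag(chunk_tag):
--     if chunk_tag == 'O':
--         return ('O', None)
--     else:
--         return chunk_tag.split('-', maxsplit=1)
--
--
-- def _render(tt, ii):
--     assert len(tt) == len(ii), ''
--     result = ''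
--     open_type = None
--     for tok, tag in zip(tt, ii):
--         prefix, ty = split_tag(tag)
--         cur = None if prefix == 'O' else ty
--         if cur != open_type:
--             if open_type is not None:
--                 result += '</{}>'.format(open_type)
--             if cur is not None:
--                 result += '<{}>'.format(cur)
--             open_type = cur
--         result += tok
--     if open_type is not None:
--         result += '</{}>'.format(open_type)
--     return result
--
--
-- def convert_iob_to_xml(tokens, iobs):
--     return [_render(tt, ii) for tt, ii in zip(tokens, iobs)]
-- ===== Notes on version B (the rewrite author's own statement) =====
-- stated objective: simpler
-- what changed: Replaces A's sentinel-padded tag list with an index loop comparing each tag against both neighbours via is_chunk_start/is_chunk_end by a single pass over zip(tokens, tags) that keeps one state variable, the currently open chunk type, closing/opening spans only when that type changes.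
import Mathlib
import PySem

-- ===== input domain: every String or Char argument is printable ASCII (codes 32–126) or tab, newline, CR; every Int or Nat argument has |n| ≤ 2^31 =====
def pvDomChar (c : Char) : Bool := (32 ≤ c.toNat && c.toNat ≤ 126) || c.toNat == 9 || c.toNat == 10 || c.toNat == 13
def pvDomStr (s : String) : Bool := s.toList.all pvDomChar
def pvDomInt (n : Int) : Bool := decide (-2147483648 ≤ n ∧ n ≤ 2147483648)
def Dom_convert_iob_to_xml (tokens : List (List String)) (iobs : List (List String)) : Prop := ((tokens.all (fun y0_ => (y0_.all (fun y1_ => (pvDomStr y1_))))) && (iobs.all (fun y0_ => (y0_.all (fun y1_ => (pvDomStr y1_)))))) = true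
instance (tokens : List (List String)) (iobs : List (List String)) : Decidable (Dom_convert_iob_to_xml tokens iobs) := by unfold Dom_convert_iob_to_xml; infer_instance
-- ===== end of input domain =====

-- B replaces A's sentinel-padded index loop with neighbour tests by a single-pass state
-- machine keeping the currently open chunk type (objective: simpler).

-- ===== PORT A =====
-- module helper split_tag (shared by both ports, as in the Python module);
-- the '| _' fallback is where Python's 2-element unpacking raises ValueError — excluded by Pre_.
def split_tag (chunk_tag : String) : String × Option String :=
  if chunk_tag = "O" then ("O", none)
  else match PySem.Str.splitMax? chunk_tag "-" 1 with
    | some (p :: ty :: _) => (p, some ty)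
    | _ => (chunk_tag, none)

def is_chunk_end (tag : String) (post_tag : String) : Bool :=
  let p1 := (split_tag tag).1
  let c1 := (split_tag tag).2
  let p2 := (split_tag post_tag).1
  let c2 := (split_tag post_tag).2
  if p1 = "O" then false
  else if p2 = "O" then decide (p1 ≠ "O")
  else decide (c1 ≠ c2)

def is_chunk_start (prev_tag : String) (tag : String) : Bool :=
  let p1 := (split_tag prev_tag).1
  let c1 := (split_tag prev_tag).2
  let p2 := (split_tag tag).1
  let c2 := (split_tag tag).2
  if p2 = "O" then false
  else if p1 = "O" then decide (p2 ≠ "O")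
  else decide (c1 ≠ c2)

-- A's inner loop body ('{}'.format(None) prints "None")
def bodyA (tt : List String) (ii' : List String) (result : String) (idx : Int) : String :=
  let tag := (split_tag (PySem.List.pyGetD ii' idx "O")).2
  let result :=
    if is_chunk_start (PySem.List.pyGetD ii' (idx - 1) "O") (PySem.List.pyGetD ii' idx "O")
    then result ++ ("<" ++ tag.getD "None" ++ ">") else result
  let result := result ++ PySem.List.pyGetD tt (idx - 1) ""
  if is_chunk_end (PySem.List.pyGetD ii' idx "O") (PySem.List.pyGetD ii' (idx + 1) "O")
  then result ++ ("</" ++ tag.getD "None" ++ ">") else result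

def convert_iob_to_xml (tokens : List (List String)) (iobs : List (List String)) : List String :=
  (tokens.zip iobs).foldl (fun results p =>
    let tt := p.1
    let ii' := ["O"] ++ p.2 ++ ["O"]
    results ++ [(PySem.List.pyRange 1 ((ii'.length : Int) - 1) 1).foldl (bodyA tt ii') ""]) []

-- ===== PORT B =====
-- state: (string built so far, type of the currently open chunk)
def stepB (st : String × Option String) (p : String × String) : String × Option String :=
  let pfx := (split_tag p.2).1
  let ty := (split_tag p.2).2
  let cur := if pfx = "O" then none else ty
  let st :=
    if cur ≠ st.2 then
      (st.1 ++ (match st.2 with | some o => "</" ++ o ++ ">" | none => "")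
            ++ (match cur with | some c => "<" ++ c ++ ">" | none => ""), cur)
    else st
  (st.1 ++ p.1, st.2)

def renderB (tt : List String) (ii : List String) : String :=
  let st := (tt.zip ii).foldl stepB ("", none)
  st.1 ++ (match st.2 with | some t => "</" ++ t ++ ">" | none => "")

def convert_iob_to_xml_alt (tokens : List (List String)) (iobs : List (List String)) : List String :=
  (tokens.zip iobs).map (fun p => renderB p.1 p.2)

-- ===== PRECONDITION & SPEC =====
-- a tag is well-formed when split_tag unpacks into two pieces: "O" or containing '-'
def WFtag (t : String) : Bool := t == "O" || t.toList.contains '-'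

-- Pre_ excludes exactly the inputs where A raises: a zipped (tokens, tags) pair of unequal
-- lengths (AssertionError) or a tag that is neither "O" nor contains '-' (ValueError when
-- split_tag's 1-element split is unpacked into two variables).
def Pre_convert_iob_to_xml (tokens : List (List String)) (iobs : List (List String)) : Prop :=
  ∀ p ∈ tokens.zip iobs, p.1.length = p.2.length ∧ ∀ tag ∈ p.2, WFtag tag = true

instance (tokens : List (List String)) (iobs : List (List String)) : Decidable (Pre_convert_iob_to_xml tokens iobs) := by
  unfold Pre_convert_iob_to_xml; infer_instance

def pvWitness_convert_iob_to_xml : List (List String) × List (List String) :=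
  ([["t1", "t2", "t3"]], [["B-C", "I-C", "O"]])

def Spec_convert_iob_to_xml (tokens : List (List String)) (iobs : List (List String)) (out : List String) : Prop := out = convert_iob_to_xml_alt tokens iobs
instance (tokens : List (List String)) (iobs : List (List String)) (out : List String) : Decidable (Spec_convert_iob_to_xml tokens iobs out) := by unfold Spec_convert_iob_to_xml; infer_instance

-- ===== CLAIM (what is proved, stated in full; the proofs are below) =====
def Claim_equal_convert_iob_to_xml : Prop := ∀ (tokens : List (List String)) (iobs : List (List String)), Dom_convert_iob_to_xml tokens iobs → Pre_convert_iob_to_xml tokens iobs → Spec_convert_iob_to_xml tokens iobs (convert_iob_to_xml tokens iobs)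

-- ===== LEMMAS AND PROOFS =====

-- ---- splitting a well-formed tag always yields two pieces ----
lemma go_zero (sep : List Char) (fuel : Nat) (l cur : List Char) (acc : List (List Char)) :
    PySem.Chars.splitOnMax.go sep fuel 0 l cur acc = ((cur.reverse ++ l) :: acc).reverse := by
  cases fuel with
  | zero => simp [PySem.Chars.splitOnMax.go]
  | succ f => cases l with
    | nil => simp [PySem.Chars.splitOnMax.go]
    | cons c rest => simp [PySem.Chars.splitOnMax.go]

lemma go_one (fuel : Nat) : ∀ (l cur : List Char) (acc : List (List Char)),
    l.length < fuel → '-' ∈ l → ∃ a b, PySem.Chars.splitOnMax.go ['-'] fuel 1 l cur acc = (b :: a :: acc).reverse := by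
  induction fuel with
  | zero => intro l cur acc hf hm; omega
  | succ f ih =>
    intro l cur acc hf hm
    cases l with
    | nil => simp at hm
    | cons c rest =>
      by_cases hc : c = '-'
      · refine ⟨cur.reverse, List.drop 1 (c :: rest), ?_⟩
        simp [PySem.Chars.splitOnMax.go, hc, List.isPrefixOf, go_zero]
      · have hr : '-' ∈ rest := by
          rcases List.mem_cons.mp hm with h | h
          · exact absurd h.symm hc
          · exact h
        obtain ⟨a, b, hab⟩ := ih rest (c :: cur) acc (by simp at hf; omega) hr
        refine ⟨a, b, ?_⟩
        simp [PySem.Chars.splitOnMax.go, List.isPrefixOf, hab]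
        intro h
        exact absurd h.symm hc

lemma split_snd_isSome (t : String) (h : WFtag t = true) (ht : ¬ t = "O") :
    ∃ p c, split_tag t = (p, some c) := by
  have hm : '-' ∈ t.toList := by
    simp [WFtag, ht] at h
    simpa [List.contains] using h
  obtain ⟨a, b, hab⟩ := go_one (t.toList.length + 1) t.toList [] [] (by omega) hm
  refine ⟨String.ofList a, String.ofList b, ?_⟩
  simp only [split_tag, ht, if_false, PySem.Str.splitMax?, PySem.Chars.splitMax?,
    PySem.Chars.splitOnMax]
  rw [if_neg (by simp), if_neg (by omega)]
  simp only [show "-".toList = ['-'] from rfl, show Int.toNat 1 = 1 from rfl]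
  rw [hab]
  simp

-- ---- A's neighbour tests expressed through the open chunk type ----
def eff (t : String) : Option String := if (split_tag t).1 = "O" then none else (split_tag t).2

lemma eff_some_of_wf (t : String) (h : WFtag t = true) (hp : ¬ (split_tag t).1 = "O") :
    eff t = (split_tag t).2 ∧ ∃ c, (split_tag t).2 = some c := by
  have ht : ¬ t = "O" := by
    intro he; subst he; simp [split_tag] at hp
  obtain ⟨p, c, hpc⟩ := split_snd_isSome t h ht
  exact ⟨by simp [eff, hp], ⟨c, by simp [hpc]⟩⟩

lemma start_eq (prev tag : String) (h : WFtag tag = true) :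
    is_chunk_start prev tag = (decide (eff tag ≠ none) && decide (eff tag ≠ eff prev)) := by
  by_cases h2 : (split_tag tag).1 = "O"
  · simp [is_chunk_start, h2, eff]
  · obtain ⟨he, c2, hc2⟩ := eff_some_of_wf tag h h2
    by_cases h1 : (split_tag prev).1 = "O"
    · simp [is_chunk_start, h1, h2, eff, hc2]
    · simp only [is_chunk_start, eff, h1, h2, if_false, hc2]
      simp [hc2, ne_comm]

lemma end_eq (tag nxt : String) (h : WFtag tag = true) :
    is_chunk_end tag nxt = (decide (eff tag ≠ none) && decide (eff tag ≠ eff nxt)) := by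
  by_cases h1 : (split_tag tag).1 = "O"
  · simp [is_chunk_end, h1, eff]
  · obtain ⟨he, c1, hc1⟩ := eff_some_of_wf tag h h1
    by_cases h2 : (split_tag nxt).1 = "O"
    · simp [is_chunk_end, h1, h2, eff, hc1]
    · simp only [is_chunk_end, eff, h1, h2, if_false, hc1]
      simp [hc1]

lemma eff_getD (tag : String) (c : String) (h : eff tag = some c) :
    (split_tag tag).2.getD "None" = c := by
  unfold eff at h
  by_cases hp : (split_tag tag).1 = "O"
  · simp [hp] at h
  · simp [hp] at h; simp [h]

lemma eff_O : eff "O" = none := by simp [eff, split_tag]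

-- ---- the two loops, restated as recursions ----
def closeStr : Option String → String
  | some t => "</" ++ t ++ ">"
  | none => ""

def openStr : Option String → String
  | some t => "<" ++ t ++ ">"
  | none => ""

def headTag : List (String × String) → String
  | [] => "O"
  | (_, tag) :: _ => tag

-- A's inner loop as a lookahead recursion over (token, tag) pairs
def arec : String → List (String × String) → String
  | _, [] => ""
  | prev, (tok, tag) :: rest =>
    (if is_chunk_start prev tag then "<" ++ ((split_tag tag).2.getD "None") ++ ">" else "")
      ++ (tok
      ++ ((if is_chunk_end tag (headTag rest) then "</" ++ ((split_tag tag).2.getD "None") ++ ">" else "")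
      ++ arec tag rest))

-- B's loop as a recursion producing the suffix from an open-type state
def brec : Option String → List (String × String) → String
  | o, [] => closeStr o
  | o, (tok, tag) :: rest =>
    (if eff tag ≠ o then closeStr o ++ openStr (eff tag) else "") ++ (tok ++ brec (eff tag) rest)

lemma open_of_eff (tag : String) (c : String) (h : eff tag = some c) :
    "<" ++ ((split_tag tag).2.getD "None") ++ ">" = openStr (eff tag) := by
  rw [eff_getD tag c h, h]; rfl

lemma close_of_eff (tag : String) (c : String) (h : eff tag = some c) :
    "</" ++ ((split_tag tag).2.getD "None") ++ ">" = closeStr (eff tag) := by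
  rw [eff_getD tag c h, h]; rfl

-- core: A's lookahead recursion = B's state machine, with the close of a still-open chunk
-- carried as a pending prefix
lemma arec_eq_brec (l : List (String × String)) : ∀ (prev : String),
    (∀ p ∈ l, WFtag p.2 = true) →
    (if eff (headTag l) = eff prev then "" else closeStr (eff prev)) ++ arec prev l
      = brec (eff prev) l := by
  induction l with
  | nil =>
    intro prev _
    simp only [headTag, eff_O, arec, brec, String.append_empty]
    by_cases h : (none : Option String) = eff prev
    · rw [if_pos h, ← h]; rfl
    · rw [if_neg h]
  | cons p rest ih =>
    intro prev hw
    obtain ⟨tok, tag⟩ := p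
    have htag : WFtag tag = true := hw (tok, tag) (by simp)
    have IH := ih tag (fun q hq => hw q (List.mem_cons_of_mem _ hq))
    have hS : (if eff tag = eff prev then "" else closeStr (eff prev))
        ++ (if is_chunk_start prev tag then "<" ++ ((split_tag tag).2.getD "None") ++ ">" else "")
        = (if eff tag ≠ eff prev then closeStr (eff prev) ++ openStr (eff tag) else "") := by
      rw [start_eq prev tag htag]
      by_cases hpv : eff tag = eff prev
      · simp [hpv]
      · rw [if_neg hpv, if_pos (show eff tag ≠ eff prev from hpv)]
        cases hc : eff tag with
        | none => simp [hc, openStr]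
        | some c =>
          rw [hc] at hpv
          have hcond : (decide ((some c : Option String) ≠ none) && decide (some c ≠ eff prev)) = true := by
            simp [hpv]
          rw [hcond, if_pos rfl, open_of_eff tag c hc, hc]
    have hE : (if is_chunk_end tag (headTag rest) then "</" ++ ((split_tag tag).2.getD "None") ++ ">" else "")
        = (if eff (headTag rest) = eff tag then "" else closeStr (eff tag)) := by
      rw [end_eq tag (headTag rest) htag]
      cases hc : eff tag with
      | none => simp [hc, closeStr]
      | some c =>
        by_cases hn : eff (headTag rest) = eff tag
        · simp [hn, hc]
        · rw [hc] at hn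
          have hcond : (decide ((some c : Option String) ≠ none) && decide (some c ≠ eff (headTag rest))) = true := by
            simp
            exact fun h => hn h.symm
          rw [hcond, if_pos rfl, if_neg hn, close_of_eff tag c hc, hc]
    show (if eff tag = eff prev then "" else closeStr (eff prev)) ++ arec prev ((tok,tag)::rest)
      = brec (eff prev) ((tok,tag)::rest)
    simp only [arec, brec, ← IH, headTag]
    rw [← String.append_assoc, hS]
    simp only [headTag.eq_def] at hE
    rw [hE]

lemma match_close (o : Option String) :
    (match o with | some t => "</" ++ t ++ ">" | none => "") = closeStr o := by
  cases o <;> rfl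

lemma match_open (o : Option String) :
    (match o with | some t => "<" ++ t ++ ">" | none => "") = openStr o := by
  cases o <;> rfl

-- B's accumulator fold = brec
lemma foldl_stepB (l : List (String × String)) : ∀ (acc : String) (o : Option String),
    (l.foldl stepB (acc, o)).1
      ++ (match (l.foldl stepB (acc, o)).2 with | some t => "</" ++ t ++ ">" | none => "")
      = acc ++ brec o l := by
  induction l with
  | nil => intro acc o; simp [brec, match_close]
  | cons p rest ih =>
    intro acc o
    obtain ⟨tok, tag⟩ := p
    have hcur : (if (split_tag tag).1 = "O" then none else (split_tag tag).2) = eff tag := rfl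
    by_cases h : eff tag = o
    · have hstep : stepB (acc, o) (tok, tag) = (acc ++ tok, o) := by
        simp [stepB, hcur, h]
      rw [List.foldl_cons, hstep, ih]
      simp [brec, h, String.append_assoc]
    · have hstep : stepB (acc, o) (tok, tag)
          = ((acc ++ closeStr o ++ openStr (eff tag)) ++ tok, eff tag) := by
        simp [stepB, hcur, h, match_close, match_open]
      rw [List.foldl_cons, hstep, ih]
      simp [brec, h, String.append_assoc]

-- ---- A's index loop over the padded tag list = arec ----
def prevTag (ii : List String) (k : Nat) : String :=
  if k = 0 then "O" else ii.getD (k - 1) "O"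

lemma getD_pad (ii : List String) (k : Nat) (hk : k ≤ ii.length) :
    ("O" :: (ii ++ ["O"])).getD k "O" = prevTag ii k := by
  cases k with
  | zero => simp [prevTag]
  | succ j =>
    simp only [List.getD_cons_succ, prevTag, Nat.succ_ne_zero, if_false, Nat.add_sub_cancel]
    have hj : j < ii.length := by omega
    rw [List.getD_append _ _ _ _ hj]

lemma getD_pad_mid (ii : List String) (k : Nat) (hk : k < ii.length) :
    ("O" :: (ii ++ ["O"])).getD (k + 1) "O" = ii.getD k "O" := by
  simp only [List.getD_cons_succ]
  rw [List.getD_append _ _ _ _ hk]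

lemma getD_pad_end (ii : List String) :
    ("O" :: (ii ++ ["O"])).getD (ii.length + 1) "O" = "O" := by
  simp [List.getD]

lemma foldl_bodyA (s : List (String × String)) : ∀ (k : Nat) (acc : String)
    (tt ii : List String), tt.length = ii.length →
    s = (tt.zip ii).drop k → k ≤ ii.length →
    (PySem.List.pyRange ((k : Int) + 1) ((ii.length : Int) + 1) 1).foldl
        (bodyA tt ("O" :: (ii ++ ["O"]))) acc
      = acc ++ arec (prevTag ii k) s := by
  induction s with
  | nil =>
    intro k acc tt ii h hs hk
    have hzl : (tt.zip ii).length = ii.length := by simp [h]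
    have hke : k = ii.length := by
      by_contra hne
      have hklt : k < (tt.zip ii).length := by omega
      have := List.drop_eq_getElem_cons hklt
      rw [← hs] at this
      simp at this
    subst hke
    rw [PySem.List.pyRange_one_eq_nil (le_refl _)]
    simp [arec]
  | cons p s' ih =>
    intro k acc tt ii h hs hk
    obtain ⟨tok, tag⟩ := p
    have hzl : (tt.zip ii).length = ii.length := by simp [h]
    have hk' : k < ii.length := by
      by_contra hne
      have : (tt.zip ii).drop k = [] := List.drop_eq_nil_of_le (by omega)
      rw [← hs] at this
      simp at this
    have hdrop := List.drop_eq_getElem_cons (l := tt.zip ii) (by omega : k < (tt.zip ii).length)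
    rw [← hs, List.getElem_zip] at hdrop
    have hpair := (List.cons_eq_cons.mp hdrop).1
    have htok : tt[k]'(by omega) = tok := (congrArg Prod.fst hpair).symm
    have htag : ii[k]'(by omega) = tag := (congrArg Prod.snd hpair).symm
    have hs' : s' = (tt.zip ii).drop (k + 1) := (List.cons_eq_cons.mp hdrop).2
    rw [PySem.List.pyRange_one_cons (by push_cast; omega : ((k : Int) + 1) < ((ii.length : Int) + 1))]
    rw [List.foldl_cons]
    have ecast : ((k : Int) + 1 + 1) = (((k + 1 : Nat) : Int) + 1) := by push_cast; ring
    rw [ecast, ih (k + 1) _ tt ii h hs' (by omega)]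
    have e2 : ((k : Int) + 1 + 1) = (((k + 2 : Nat) : Int)) := by push_cast; ring
    have e1 : ((k : Int) + 1) = (((k + 1 : Nat) : Int)) := by push_cast; ring
    have e0 : ((k : Int) + 1 - 1) = ((k : Nat) : Int) := by push_cast; ring
    have hbody : bodyA tt ("O" :: (ii ++ ["O"])) acc ((k : Int) + 1)
        = acc ++ ((if is_chunk_start (prevTag ii k) tag then "<" ++ ((split_tag tag).2.getD "None") ++ ">" else "")
          ++ (tok ++ (if is_chunk_end tag (headTag s') then "</" ++ ((split_tag tag).2.getD "None") ++ ">" else ""))) := by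
      unfold bodyA
      rw [e0, e2, e1]
      rw [PySem.List.pyGetD_natCast, PySem.List.pyGetD_natCast, PySem.List.pyGetD_natCast,
        PySem.List.pyGetD_natCast]
      rw [getD_pad ii k (by omega), getD_pad_mid ii k hk']
      have hgtag : ii.getD k "O" = tag := by rw [List.getD_eq_getElem _ _ (by omega), htag]
      have hgtok : tt.getD k "" = tok := by rw [List.getD_eq_getElem _ _ (by omega), htok]
      have hnext : ("O" :: (ii ++ ["O"])).getD (k + 2) "O" = headTag s' := by
        by_cases hlast : k + 1 < ii.length
        · have : ("O" :: (ii ++ ["O"])).getD (k + 1 + 1) "O" = ii.getD (k + 1) "O" :=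
            getD_pad_mid ii (k + 1) hlast
          rw [show k + 2 = k + 1 + 1 from rfl, this]
          have hdrop2 := List.drop_eq_getElem_cons (l := tt.zip ii) (by omega : k + 1 < (tt.zip ii).length)
          rw [← hs'] at hdrop2
          rw [hdrop2, List.getElem_zip, headTag, List.getD_eq_getElem _ _ (by omega)]
        · have hke : k + 1 = ii.length := by omega
          have hs'nil : s' = [] := by
            rw [hs', List.drop_eq_nil_of_le (by omega)]
          rw [show k + 2 = k + 1 + 1 from rfl, hke, getD_pad_end, hs'nil]
          rfl
      rw [hgtag, hgtok, hnext]
      by_cases hS : is_chunk_start (prevTag ii k) tag <;>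
        by_cases hE : is_chunk_end tag (headTag s') <;>
        simp [hS, hE, String.append_assoc]
    rw [hbody]
    have hpt : prevTag ii (k + 1) = tag := by
      simp only [prevTag, Nat.succ_ne_zero, if_false, Nat.add_sub_cancel]
      rw [List.getD_eq_getElem _ _ (by omega), htag]
    rw [hpt]
    show _ = acc ++ arec (prevTag ii k) ((tok, tag) :: s')
    simp only [arec]
    simp [String.append_assoc]

-- ---- one zipped pair: A's inner loop = B's renderB ----
lemma pair_eq (tt ii : List String) (hlen : tt.length = ii.length)
    (hwf : ∀ tag ∈ ii, WFtag tag = true) :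
    (PySem.List.pyRange 1 (((["O"] ++ ii ++ ["O"]).length : Int) - 1) 1).foldl
        (bodyA tt (["O"] ++ ii ++ ["O"])) ""
      = renderB tt ii := by
  have hb : (((["O"] ++ ii ++ ["O"]).length : Int) - 1) = ((ii.length : Int) + 1) := by
    simp
  have hA : (PySem.List.pyRange 1 (((["O"] ++ ii ++ ["O"]).length : Int) - 1) 1).foldl
        (bodyA tt (["O"] ++ ii ++ ["O"])) "" = arec "O" (tt.zip ii) := by
    rw [hb, show PySem.List.pyRange 1 ((ii.length : Int) + 1) 1
        = PySem.List.pyRange (((0 : Nat) : Int) + 1) ((ii.length : Int) + 1) 1 by norm_num]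
    rw [show (["O"] ++ ii ++ ["O"]) = ("O" :: (ii ++ ["O"])) from rfl]
    rw [foldl_bodyA (tt.zip ii) 0 "" tt ii hlen (by simp) (by omega)]
    simp [prevTag, String.empty_append]
  rw [hA]
  have hwz : ∀ p ∈ tt.zip ii, WFtag p.2 = true := fun p hp => hwf p.2 (List.of_mem_zip hp).2
  have hab := arec_eq_brec (tt.zip ii) "O" hwz
  rw [eff_O] at hab
  rw [show closeStr none = "" from rfl, ite_self, String.empty_append] at hab
  rw [hab]
  have hfb := foldl_stepB (tt.zip ii) "" none
  rw [String.empty_append] at hfb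
  rw [← hfb]
  rfl

-- ===== VERDICT (by name: the statement is the Claim_ definition above) =====
theorem convert_iob_to_xml_spec : Claim_equal_convert_iob_to_xml := by
  intro tokens iobs _ hpre
  unfold Spec_convert_iob_to_xml convert_iob_to_xml convert_iob_to_xml_alt
  rw [PySem.List.foldl_append_singleton_eq_map, List.nil_append]
  apply List.map_congr_left
  intro p hp
  exact pair_eq p.1 p.2 (hpre p hp).1 (hpre p hp).2
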